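-- pv_equiv track=rewrite | github.com/RayChenPy/AI_writtenscore | static/app_0629_v4.py | count_error
-- ===== SOURCE A (Python) =====
-- def count_error(predict):
--     count_error=0
--     ans=[]
--     for i in predict:
--         ans.append(i[0])
--
--     for number,i in enumerate(predict):
--         for each in i[1:]:
--             if each != ans[number]:
--                 count_error+=1
--     return count_error
-- ===== SOURCE B (Python) =====
-- def count_error(predict):
--     total = 0
--     for row in predict:
--         freq = {}
--         for x in row:
--             freq[x] = freq.get(x, 0) + 1
--         total += len(row) - freq[row[0]]
--     return total
-- ===== Notes on version B (the rewrite author's own statement) =====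
-- stated objective: alternative
-- what changed: Replaces A's ans list and nested mismatch scan (comparing each tail element to the reference) with a per-row frequency dictionary built in one comparison-free pass: mismatches = len(row) - freq[row[0]].
import Mathlib
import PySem

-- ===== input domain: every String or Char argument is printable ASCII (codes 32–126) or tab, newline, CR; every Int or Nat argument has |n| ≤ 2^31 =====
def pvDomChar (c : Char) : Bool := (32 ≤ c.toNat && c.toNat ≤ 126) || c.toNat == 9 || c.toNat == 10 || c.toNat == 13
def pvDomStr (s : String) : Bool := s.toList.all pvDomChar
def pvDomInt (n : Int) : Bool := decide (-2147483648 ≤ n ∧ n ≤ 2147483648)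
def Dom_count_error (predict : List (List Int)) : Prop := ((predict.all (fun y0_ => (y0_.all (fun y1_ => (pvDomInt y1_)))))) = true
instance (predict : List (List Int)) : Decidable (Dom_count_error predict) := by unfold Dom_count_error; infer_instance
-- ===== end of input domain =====

-- B replaces A's ans list and nested mismatch scan with a per-row frequency dictionary:
-- mismatches = len(row) - freq[row[0]] (alternative decomposition, same cost).

-- ===== PORT A =====
def count_error (predict : List (List Int)) : Int :=
  let ans := predict.map (fun i => (PySem.List.pyGet? i 0).getD 0)
  (PySem.List.enumerate predict).foldl
    (fun c p =>
      (PySem.List.slice p.2 (some 1) none).foldl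
        (fun c each => if each ≠ (PySem.List.pyGet? ans p.1).getD 0 then c + 1 else c) c)
    0

-- ===== PORT B =====
-- freq[row[0]] never raises under Pre_ (row nonempty ⇒ the key was inserted), so getD is exact there.
def count_error_alt (predict : List (List Int)) : Int :=
  predict.foldl
    (fun total row =>
      let freq := row.foldl (fun d x => d.insert x (d.getD x 0 + 1)) PySem.Dict.empty
      total + ((row.length : Int) - freq.getD ((PySem.List.pyGet? row 0).getD 0) 0))
    0

-- ===== PRECONDITION & SPEC =====
-- Pre_ excludes inputs with an empty row, on which A's i[0] raises IndexError (B's row[0] raises there too).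
def Pre_count_error (predict : List (List Int)) : Prop := ∀ r ∈ predict, r ≠ []
instance (predict : List (List Int)) : Decidable (Pre_count_error predict) := by unfold Pre_count_error; infer_instance
def pvWitness_count_error : List (List Int) := [[1, 2, 1], [3, 3]]

def Spec_count_error (predict : List (List Int)) (out : Int) : Prop := out = count_error_alt predict
instance (predict : List (List Int)) (out : Int) : Decidable (Spec_count_error predict out) := by unfold Spec_count_error; infer_instance

-- ===== CLAIM (what is proved, stated in full; the proofs are below) =====
def Claim_equal_count_error : Prop := ∀ (predict : List (List Int)), Dom_count_error predict → Pre_count_error predict → Spec_count_error predict (count_error predict)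

-- ===== LEMMAS AND PROOFS =====

-- A's outer loop, generalized over the enumerate start and the accumulator:
-- each row contributes the tail's count of elements differing from the looked-up ans value.
lemma countError_loop (rows : List (List Int)) (ans : List Int) (s : Int) (c : Int)
    (h : ∀ k : Nat, k < rows.length →
      (PySem.List.pyGet? ans (s + k)).getD 0 = (PySem.List.pyGet? (rows.getD k []) 0).getD 0) :
    (PySem.List.enumerate rows s).foldl
      (fun c p =>
        (PySem.List.slice p.2 (some 1) none).foldl
          (fun c each => if each ≠ (PySem.List.pyGet? ans p.1).getD 0 then c + 1 else c) c)
      c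
    = c + (rows.map (fun row =>
        ((row.drop 1).countP (fun e => e ≠ (PySem.List.pyGet? row 0).getD 0) : Int))).sum := by
  induction rows generalizing s c with
  | nil => simp [PySem.List.enumerate]
  | cons r rs ih =>
    rw [PySem.List.enumerate_cons, List.foldl_cons]
    have h0 := h 0 (by simp)
    simp only [Int.natCast_zero, add_zero, List.getD_cons_zero] at h0
    have hinner :
        (PySem.List.slice r (some 1) none).foldl
          (fun c each => if each ≠ (PySem.List.pyGet? ans s).getD 0 then c + 1 else c) c
        = c + ((r.drop 1).countP (fun e => e ≠ (PySem.List.pyGet? r 0).getD 0) : Int) := by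
      rw [PySem.List.slice_from r (by norm_num : (0:Int) ≤ 1), h0]
      simpa using PySem.List.foldl_count_if (fun e => decide (e ≠ (PySem.List.pyGet? r 0).getD 0)) (r.drop 1) c
    rw [hinner, ih (s + 1) _ ?_]
    · simp [List.map_cons, List.sum_cons]; ring
    · intro k hk
      have := h (k + 1) (by simpa using Nat.succ_lt_succ hk)
      simpa [add_assoc, add_comm, add_left_comm, Int.natCast_succ] using this

-- B's outer loop is the sum of the per-row contributions.
lemma altLoop (rows : List (List Int)) (c : Int) :
    rows.foldl
      (fun total row =>
        let freq := row.foldl (fun d x => d.insert x (d.getD x 0 + 1)) PySem.Dict.empty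
        total + ((row.length : Int) - freq.getD ((PySem.List.pyGet? row 0).getD 0) 0))
      c
    = c + (rows.map (fun row =>
        ((row.length : Int) -
          (row.foldl (fun d x => d.insert x (d.getD x 0 + 1)) PySem.Dict.empty).getD
            ((PySem.List.pyGet? row 0).getD 0) 0))).sum := by
  induction rows generalizing c with
  | nil => simp
  | cons r rs ih => simp [List.foldl_cons, ih]; ring

-- Per nonempty row: tail mismatches with the head = length - (frequency dict at the head).
lemma row_count (a : Int) (t : List Int) :
    (((a :: t).drop 1).countP (fun e => e ≠ (PySem.List.pyGet? (a :: t) 0).getD 0) : Int)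
    = ((a :: t).length : Int) -
      ((a :: t).foldl (fun d x => d.insert x (d.getD x 0 + 1)) PySem.Dict.empty).getD
        ((PySem.List.pyGet? (a :: t) 0).getD 0) 0 := by
  have h0 : (PySem.List.pyGet? (a :: t) 0).getD 0 = a := by
    simp [PySem.List.pyGet?, PySem.List.pyIdx?]
  rw [h0]
  rw [PySem.Dict.getD_foldl_insert_add_one]
  have hcount : (a :: t).count a = t.count a + 1 := by simp
  have hsplit : t.countP (fun e => decide (e ≠ a)) + t.count a = t.length := by
    have hlen := List.length_eq_countP_add_countP (l := t) (p := fun e => decide (e ≠ a))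
    have hc : List.countP (fun x => decide ¬(decide (x ≠ a) = true)) t = t.count a := by
      rw [List.count]; exact List.countP_congr (fun x _ => by simp)
    omega
  simp only [List.drop_one, List.tail_cons, List.length_cons, hcount, PySem.Dict.getD_empty]
  push_cast
  omega

-- ===== VERDICT (by name: the statement is the Claim_ definition above) =====
theorem count_error_spec : Claim_equal_count_error := by
  intro predict _ hpre
  unfold Spec_count_error count_error count_error_alt
  rw [countError_loop predict (predict.map (fun i => (PySem.List.pyGet? i 0).getD 0)) 0 0 ?_]
  · rw [altLoop, zero_add, zero_add]
    congr 1
    apply List.map_congr_left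
    intro row hrow
    obtain ⟨a, t, rfl⟩ := List.exists_cons_of_ne_nil (hpre row hrow)
    exact row_count a t
  · intro k hk
    rw [zero_add]
    rw [PySem.List.pyGet?_natCast]
    simp [List.getElem?_map, List.getD_eq_getElem?_getD, List.getElem?_eq_getElem hk]
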